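-- pv_equiv track=rewrite | github.com/GryffindorafAviator/LaiCode | 196. Place To Put The Chair II.py | putChair
-- ===== SOURCE A (Python) =====
-- def putChair(gym):
--   """
--   input: char[][] gym
--   return: Integer[]
--   """
--   ROWS = len(gym)
--   COLS = len(gym[0])
--
--   row_idx_cnt = [0] * ROWS
--   col_idx_cnt = [0] * COLS
--   cnt = 0
--
--   for i in range(ROWS):
--     for j in range(COLS):
--       if gym[i][j] == 'E':
--         cnt += 1
--         row_idx_cnt[i] += 1
--         col_idx_cnt[j] += 1
--
--   median = cnt // 2 + 1
--
--   ans = [0, 0]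
--   temp = 0
--   for i in range(ROWS):
--     temp += row_idx_cnt[i]
--     if temp >= median:
--       ans[0] = i
--       break
--   temp = 0
--   for i in range(COLS):
--     temp += col_idx_cnt[i]
--     if temp >= median:
--       ans[1] = i
--       break
--
--   return ans
-- ===== SOURCE B (Python) =====
-- def putChair(gym):
--   rows_n = len(gym)
--   cols_n = len(gym[0])
--   rows = [i for i in range(rows_n) for j in range(cols_n) if gym[i][j] == 'E']
--   cols = [j for j in range(cols_n) for i in range(rows_n) if gym[i][j] == 'E']
--   if not rows:
--     return [0, 0]
--   k = len(rows) // 2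
--   return [rows[k], cols[k]]
-- ===== Notes on version B (the rewrite author's own statement) =====
-- stated objective: simpler
-- what changed: B collects the row indices (row-major, already sorted) and column indices (column-major, already sorted) of all 'E' cells and returns the element at index cnt//2 of each list, replacing A's per-axis histograms, cumulative-sum break-loops and mutable ans array.
-- outside the precondition, e.g. on putChair([]): A raises IndexError, B raises IndexError; on putChair([['E', 'E'], ['C']]): A raises IndexError, B raises IndexError
import Mathlib
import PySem

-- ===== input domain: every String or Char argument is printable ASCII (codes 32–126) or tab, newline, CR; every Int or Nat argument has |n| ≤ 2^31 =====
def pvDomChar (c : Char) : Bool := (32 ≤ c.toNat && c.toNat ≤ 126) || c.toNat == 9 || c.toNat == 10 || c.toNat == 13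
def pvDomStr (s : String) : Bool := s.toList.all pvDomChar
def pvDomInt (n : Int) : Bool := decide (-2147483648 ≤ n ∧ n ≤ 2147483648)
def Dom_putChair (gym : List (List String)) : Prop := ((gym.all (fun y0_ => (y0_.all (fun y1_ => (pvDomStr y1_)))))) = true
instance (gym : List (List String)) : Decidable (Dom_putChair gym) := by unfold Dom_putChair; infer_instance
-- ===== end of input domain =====

-- B replaces A's histogram-plus-prefix-scan with explicit coordinate lists and a direct
-- median index (objective: simpler); same asymptotic cost.

-- ===== PORT A =====
-- the two break-loops of A: first index (0-based, as Int) at which the running sum reaches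
-- `median`, 0 (ans's untouched default) if it never does
def scanBreak (median : Int) : List Int → Int → Int → Int
  | [], _, _ => 0
  | x :: xs, temp, i => if temp + x ≥ median then i else scanBreak median xs (temp + x) (i + 1)

def putChair (gym : List (List String)) : List Int :=
  let ROWS := gym.length
  let COLS := (gym.headD []).length
  let st : List Int × List Int × Int :=
    (List.range ROWS).foldl (fun st i =>
      (List.range COLS).foldl (fun (st : List Int × List Int × Int) j =>
        if (gym.getD i []).getD j "" == "E" then
          (st.1.modify i (· + 1), st.2.1.modify j (· + 1), st.2.2 + 1)
        else st) st)
      (List.replicate ROWS (0 : Int), List.replicate COLS (0 : Int), (0 : Int))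
  let median := PySem.Int.floordiv st.2.2 2 + 1
  [scanBreak median st.1 0 0, scanBreak median st.2.1 0 0]

-- ===== PORT B =====
def putChair_alt (gym : List (List String)) : List Int :=
  let rows_n := gym.length
  let cols_n := (gym.headD []).length
  let rows := (List.range rows_n).flatMap (fun i =>
      ((List.range cols_n).filter (fun j => (gym.getD i []).getD j "" == "E")).map (fun _ => (i : Int)))
  let cols := (List.range cols_n).flatMap (fun j =>
      ((List.range rows_n).filter (fun i => (gym.getD i []).getD j "" == "E")).map (fun _ => (j : Int)))
  if rows = [] then [0, 0]
  else
    let k := rows.length / 2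
    [rows.getD k 0, cols.getD k 0]

-- ===== PRECONDITION & SPEC =====
-- Pre_ excludes exactly the inputs on which the Python A raises IndexError: the empty grid
-- (gym[0] fails) and grids with a row shorter than row 0 (gym[i][j] fails).
def Pre_putChair (gym : List (List String)) : Prop :=
  gym ≠ [] ∧ ∀ row ∈ gym, (gym.headD []).length ≤ row.length
instance (gym : List (List String)) : Decidable (Pre_putChair gym) := by unfold Pre_putChair; infer_instance
def pvWitness_putChair : List (List String) := [["E", "C"], ["C", "E"]]
def Spec_putChair (gym : List (List String)) (out : List Int) : Prop := out = putChair_alt gym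
instance (gym : List (List String)) (out : List Int) : Decidable (Spec_putChair gym out) := by unfold Spec_putChair; infer_instance

-- ===== CLAIM (what is proved, stated in full; the proofs are below) =====
def Claim_equal_putChair : Prop := ∀ (gym : List (List String)), Dom_putChair gym → Pre_putChair gym → Spec_putChair gym (putChair gym)

-- ===== LEMMAS AND PROOFS =====

-- the sorted list whose multiplicity of s + t is cs[t]
def expandFrom (s : Int) : List Nat → List Int
  | [] => []
  | c :: cs => List.replicate c s ++ expandFrom (s + 1) cs

def rcnt (gym : List (List String)) (C : Nat) (i : Nat) : Nat :=
  ((List.range C).filter (fun j => (gym.getD i []).getD j "" == "E")).length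

def ccnt (gym : List (List String)) (R : Nat) (j : Nat) : Nat :=
  ((List.range R).filter (fun i => (gym.getD i []).getD j "" == "E")).length

lemma length_expandFrom (cs : List Nat) : ∀ s, (expandFrom s cs).length = cs.sum := by
  induction cs with
  | nil => intro s; rfl
  | cons c cs ih => intro s; simp [expandFrom, ih]

lemma getD_modify (l : List Int) (i : Nat) (f : Int → Int) (t : Nat) :
    (l.modify i f).getD t 0 = if t = i ∧ i < l.length then f (l.getD t 0) else l.getD t 0 := by
  rw [List.getD_eq_getElem?_getD, List.getD_eq_getElem?_getD, List.getElem?_modify]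
  by_cases ht : t < l.length
  · rw [List.getElem?_eq_getElem ht]
    by_cases hti : t = i
    · subst hti
      simp [ht]
    · simp [Ne.symm hti, hti]
  · rw [List.getElem?_eq_none (by omega)]
    have : ¬ (t = i ∧ i < l.length) := by rintro ⟨rfl, h⟩; omega
    simp [this]

-- inner loop of A's counting pass, over an arbitrary nodup list of column indices
lemma innerFold (gym : List (List String)) (i : Nat) (js : List Nat) (hnd : js.Nodup)
    (r c : List Int) (n : Int) (hi : i < r.length) (hjs : ∀ j ∈ js, j < c.length) :
    let res := js.foldl (fun (st : List Int × List Int × Int) j =>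
        if (gym.getD i []).getD j "" == "E" then
          (st.1.modify i (· + 1), st.2.1.modify j (· + 1), st.2.2 + 1)
        else st) (r, c, n)
    res.1.length = r.length ∧ res.2.1.length = c.length ∧
    (∀ t, res.1.getD t 0 = r.getD t 0 +
        if t = i then ((js.filter (fun j => (gym.getD i []).getD j "" == "E")).length : Int) else 0) ∧
    (∀ t, res.2.1.getD t 0 = c.getD t 0 +
        if t ∈ js ∧ (gym.getD i []).getD t "" == "E" then 1 else 0) ∧
    res.2.2 = n + ((js.filter (fun j => (gym.getD i []).getD j "" == "E")).length : Int) := by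
  induction js generalizing r c n with
  | nil =>
    dsimp only
    exact ⟨rfl, rfl, by simp, by simp, by simp⟩
  | cons j js ih =>
    dsimp only
    obtain ⟨hj_notmem, hnd2⟩ := List.nodup_cons.mp hnd
    have hjc : j < c.length := hjs j (List.mem_cons_self)
    rw [List.foldl_cons]
    by_cases hE : ((gym.getD i []).getD j "" == "E") = true
    · rw [if_pos hE]
      obtain ⟨a1, a2, a3, a4, a5⟩ := ih hnd2 (r.modify i (· + 1)) (c.modify j (· + 1)) (n + 1)
        (by rw [List.length_modify]; exact hi)
        (fun j' hj' => by rw [List.length_modify]; exact hjs j' (List.mem_cons_of_mem _ hj'))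
      refine ⟨by rw [a1, List.length_modify], by rw [a2, List.length_modify], ?_, ?_, ?_⟩
      · intro t
        rw [a3 t, getD_modify, List.filter_cons, if_pos hE, List.length_cons]
        by_cases hti : t = i
        · subst hti
          rw [if_pos ⟨rfl, hi⟩, if_pos rfl, if_pos rfl]
          push_cast; ring
        · rw [if_neg (fun h => hti h.1), if_neg hti, if_neg hti]
      · intro t
        rw [a4 t, getD_modify]
        by_cases htj : t = j
        · subst htj
          rw [if_pos ⟨rfl, hjc⟩, if_neg (fun h => hj_notmem h.1),
            if_pos ⟨List.mem_cons_self, hE⟩]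
          ring
        · rw [if_neg (fun h => htj h.1)]
          by_cases h2 : t ∈ js ∧ ((gym.getD i []).getD t "" == "E") = true
          · rw [if_pos h2, if_pos ⟨List.mem_cons_of_mem _ h2.1, h2.2⟩]
          · rw [if_neg h2,
              if_neg (fun h => h2 ⟨(List.mem_cons.mp h.1).resolve_left htj, h.2⟩)]
      · rw [a5, List.filter_cons, if_pos hE, List.length_cons]
        push_cast; ring
    · rw [if_neg hE]
      obtain ⟨a1, a2, a3, a4, a5⟩ := ih hnd2 r c n hi
        (fun j' hj' => hjs j' (List.mem_cons_of_mem _ hj'))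
      refine ⟨a1, a2, ?_, ?_, ?_⟩
      · intro t
        rw [a3 t, List.filter_cons, if_neg hE]
      · intro t
        rw [a4 t]
        by_cases h2 : t ∈ js ∧ ((gym.getD i []).getD t "" == "E") = true
        · rw [if_pos h2, if_pos ⟨List.mem_cons_of_mem _ h2.1, h2.2⟩]
        · rw [if_neg h2,
            if_neg (fun (h : t ∈ j :: js ∧ ((gym.getD i []).getD t "" == "E") = true) =>
              (List.mem_cons.mp h.1).elim (fun ht => hE (ht ▸ h.2)) (fun ht => h2 ⟨ht, h.2⟩))]
      · rw [a5, List.filter_cons, if_neg hE]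

-- outer loop of A's counting pass
lemma outerFold (gym : List (List String)) (C : Nat) (is : List Nat) (hnd : is.Nodup)
    (r c : List Int) (n : Int) (his : ∀ i ∈ is, i < r.length) (hC : c.length = C) :
    let res := is.foldl (fun st i =>
      (List.range C).foldl (fun (st : List Int × List Int × Int) j =>
        if (gym.getD i []).getD j "" == "E" then
          (st.1.modify i (· + 1), st.2.1.modify j (· + 1), st.2.2 + 1)
        else st) st) (r, c, n)
    res.1.length = r.length ∧ res.2.1.length = c.length ∧
    (∀ t, res.1.getD t 0 = r.getD t 0 + if t ∈ is then (rcnt gym C t : Int) else 0) ∧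
    (∀ t, t < C → res.2.1.getD t 0 = c.getD t 0 +
        ((is.filter (fun i => (gym.getD i []).getD t "" == "E")).length : Int)) ∧
    res.2.2 = n + ((is.map (rcnt gym C)).sum : Int) := by
  induction is generalizing r c n with
  | nil =>
    dsimp only
    exact ⟨rfl, rfl, by simp, by simp, by simp⟩
  | cons i is ih =>
    dsimp only
    obtain ⟨hi_notmem, hnd2⟩ := List.nodup_cons.mp hnd
    have hiR : i < r.length := his i List.mem_cons_self
    rw [List.foldl_cons]
    obtain ⟨a1, a2, a3, a4, a5⟩ := innerFold gym i (List.range C) List.nodup_range r c n hiR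
      (fun j hj => by rw [hC]; exact List.mem_range.mp hj)
    rcases hst : List.foldl (fun (st : List Int × List Int × Int) j =>
        if (gym.getD i []).getD j "" == "E" then
          (st.1.modify i (· + 1), st.2.1.modify j (· + 1), st.2.2 + 1)
        else st) (r, c, n) (List.range C) with ⟨r1, c1, n1⟩
    rw [hst] at a1 a2 a3 a4 a5
    dsimp only at a1 a2 a3 a4 a5
    obtain ⟨b1, b2, b3, b4, b5⟩ := ih hnd2 r1 c1 n1
      (fun i' hi' => by rw [a1]; exact his i' (List.mem_cons_of_mem _ hi'))
      (by rw [a2, hC])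
    have hr : ((List.range C).filter (fun j => (gym.getD i []).getD j "" == "E")).length
        = rcnt gym C i := rfl
    refine ⟨by rw [b1, a1], by rw [b2, a2], ?_, ?_, ?_⟩
    · intro t
      rw [b3 t, a3 t, hr]
      by_cases hti : t = i
      · subst hti
        rw [if_pos rfl, if_neg hi_notmem, if_pos List.mem_cons_self]
        ring
      · rw [if_neg hti]
        by_cases h2 : t ∈ is
        · rw [if_pos h2, if_pos (List.mem_cons_of_mem _ h2)]
          ring
        · rw [if_neg h2, if_neg (fun h => h2 ((List.mem_cons.mp h).resolve_left hti))]
          ring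
    · intro t htC
      have htm : t ∈ List.range C := List.mem_range.mpr htC
      rw [b4 t htC, a4 t, List.filter_cons]
      by_cases hE : ((gym.getD i []).getD t "" == "E") = true
      · rw [if_pos ⟨htm, hE⟩, if_pos hE, List.length_cons]
        push_cast; ring
      · rw [if_neg (fun h => hE h.2), if_neg hE]
        ring
    · rw [b5, a5, hr, List.map_cons, List.sum_cons]
      push_cast; ring

lemma scan_shift (cs : List Nat) : ∀ (m t i : Int), t < m → m ≤ t + (cs.sum : Int) →
    scanBreak m (cs.map (fun x : Nat => (x : Int))) t i = i + scanBreak (m - t) (cs.map (fun x : Nat => (x : Int))) 0 0 := by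
  induction cs with
  | nil =>
    intro m t i h1 h2
    simp only [List.sum_nil, Nat.cast_zero, add_zero] at h2
    omega
  | cons c cs ih =>
    intro m t i h1 h2
    have h2' : m ≤ t + ((c : Int) + (cs.sum : Int)) := by
      rw [List.sum_cons, Nat.cast_add] at h2; omega
    rw [List.map_cons, scanBreak, scanBreak]
    by_cases hc : t + (c : Int) ≥ m
    · rw [if_pos hc, if_pos (by omega)]; omega
    · rw [if_neg hc, if_neg (by omega)]
      rw [ih m (t + (c : Int)) (i + 1) (by omega) (by omega)]
      rw [ih (m - t) ((0 : Int) + (c : Int)) ((0 : Int) + 1) (by omega) (by omega)]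
      have h3 : m - (t + (c : Int)) = m - t - ((0 : Int) + (c : Int)) := by ring
      rw [h3]; ring

lemma median_getD (cs : List Nat) : ∀ (s : Int) (k : Nat), k < cs.sum →
    (expandFrom s cs).getD k 0 = s + scanBreak ((k : Int) + 1) (cs.map (fun x : Nat => (x : Int))) 0 0 := by
  induction cs with
  | nil => intro s k h; simp at h
  | cons c cs ih =>
    intro s k h
    simp only [List.sum_cons] at h
    rw [List.map_cons, scanBreak]
    simp only [expandFrom]
    by_cases hk : k < c
    · rw [List.getD_append _ _ _ _ (by simpa using hk)]
      rw [if_pos (by omega)]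
      rw [List.getD_replicate _ hk]; ring
    · rw [List.getD_append_right _ _ _ _ (by simpa using hk)]
      simp only [List.length_replicate]
      rw [ih (s + 1) (k - c) (by omega)]
      rw [if_neg (by omega)]
      rw [scan_shift cs ((k : Int) + 1) ((0 : Int) + (c : Int)) ((0 : Int) + 1) (by omega) (by omega)]
      have hcast : (k : Int) + 1 - ((0 : Int) + (c : Int)) = ((k - c : Nat) : Int) + 1 := by omega
      rw [hcast]; ring

lemma scan_zero (xs : List Int) : ∀ (m t i : Int), (∀ x ∈ xs, x = 0) → t < m →
    scanBreak m xs t i = 0 := by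
  induction xs with
  | nil => intro m t i _ _; rfl
  | cons x xs ih =>
    intro m t i hz h
    have hx : x = 0 := hz x (by simp)
    simp only [scanBreak, hx, add_zero, if_neg (by omega : ¬ t ≥ m)]
    exact ih m t (i + 1) (fun y hy => hz y (by simp [hy])) h

lemma flatMap_expand (g : Nat → Nat) : ∀ (len s : Nat),
    (List.range' s len).flatMap (fun i => List.replicate (g i) (i : Int)) =
      expandFrom (s : Int) ((List.range' s len).map g) := by
  intro len
  induction len with
  | zero => intro s; rfl
  | succ n ih =>
    intro s
    rw [List.range'_succ]
    simp only [List.flatMap_cons, List.map_cons, expandFrom, ih (s + 1)]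
    norm_num

lemma filter_range_sum (C : Nat) (p : Nat → Bool) :
    (((List.range C).filter p).length : Nat) = ∑ x ∈ Finset.range C, if p x then 1 else 0 := by
  induction C with
  | zero => rfl
  | succ n ih =>
    rw [List.range_succ, List.filter_append, List.length_append, ih, Finset.sum_range_succ]
    by_cases h : p n <;> simp [h]

lemma map_range_sum (C : Nat) (f : Nat → Nat) :
    ((List.range C).map f).sum = ∑ x ∈ Finset.range C, f x := by
  induction C with
  | zero => rfl
  | succ n ih =>
    rw [List.range_succ, List.map_append, List.sum_append, ih, Finset.sum_range_succ]
    simp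

lemma sum_swap (gym : List (List String)) (R C : Nat) :
    ((List.range R).map (rcnt gym C)).sum = ((List.range C).map (ccnt gym R)).sum := by
  rw [map_range_sum, map_range_sum]
  simp only [rcnt, ccnt, filter_range_sum]
  exact Finset.sum_comm

-- ===== VERDICT (by name: the statement is the Claim_ definition above) =====
theorem putChair_spec : Claim_equal_putChair := by
  intro gym _ _
  unfold Spec_putChair putChair putChair_alt
  dsimp only
  set R := gym.length with hRdef
  set C := (gym.headD []).length with hCdef
  obtain ⟨h1, h2, h3, h4, h5⟩ := outerFold gym C (List.range R) List.nodup_range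
    (List.replicate R 0) (List.replicate C 0) 0
    (fun i hi => by rw [List.length_replicate]; exact List.mem_range.mp hi)
    List.length_replicate
  rcases hst : List.foldl (fun st i =>
      (List.range C).foldl (fun (st : List Int × List Int × Int) j =>
        if (gym.getD i []).getD j "" == "E" then
          (st.1.modify i (· + 1), st.2.1.modify j (· + 1), st.2.2 + 1)
        else st) st)
      (List.replicate R (0 : Int), List.replicate C (0 : Int), (0 : Int))
      (List.range R) with ⟨r1, c1, n1⟩
  rw [hst] at h1 h2 h3 h4 h5
  dsimp only at h1 h2 h3 h4 h5 ⊢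
  -- characterise A's histograms
  have hr1 : r1 = (List.range R).map (fun t => (rcnt gym C t : Int)) := by
    apply List.ext_getElem
    · rw [h1]; simp
    · intro t ht1 ht2
      have htR : t < R := by rw [h1, List.length_replicate] at ht1; exact ht1
      rw [← List.getD_eq_getElem _ 0 ht1, h3 t, List.getD_replicate _ htR,
        if_pos (List.mem_range.mpr htR)]
      rw [List.getElem_map, List.getElem_range]
      ring
  have hc1 : c1 = (List.range C).map (fun t => (ccnt gym R t : Int)) := by
    apply List.ext_getElem
    · rw [h2]; simp
    · intro t ht1 ht2
      have htC : t < C := by rw [h2, List.length_replicate] at ht1; exact ht1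
      rw [← List.getD_eq_getElem _ 0 ht1, h4 t htC, List.getD_replicate _ htC]
      rw [List.getElem_map, List.getElem_range]
      have : ((List.range R).filter
          (fun i => (gym.getD i []).getD t "" == "E")).length = ccnt gym R t := rfl
      rw [this]; ring
  have hn1 : n1 = (((List.range R).map (rcnt gym C)).sum : Int) := by rw [h5]; ring
  -- characterise B's coordinate lists
  have hmapr : ∀ i : Nat, ((List.range C).filter
      (fun j => (gym.getD i []).getD j "" == "E")).map (fun _ => (i : Int)) =
      List.replicate (rcnt gym C i) (i : Int) := fun i => List.map_const'
  have hmapc : ∀ j : Nat, ((List.range R).filter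
      (fun i => (gym.getD i []).getD j "" == "E")).map (fun _ => (j : Int)) =
      List.replicate (ccnt gym R j) (j : Int) := fun j => List.map_const'
  have hrows : (List.range R).flatMap (fun i => ((List.range C).filter
      (fun j => (gym.getD i []).getD j "" == "E")).map (fun _ => (i : Int))) =
      expandFrom 0 ((List.range R).map (rcnt gym C)) := by
    simp only [hmapr]
    rw [List.range_eq_range', flatMap_expand (rcnt gym C) R 0, Nat.cast_zero]
  have hcols : (List.range C).flatMap (fun j => ((List.range R).filter
      (fun i => (gym.getD i []).getD j "" == "E")).map (fun _ => (j : Int))) =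
      expandFrom 0 ((List.range C).map (ccnt gym R)) := by
    simp only [hmapc]
    rw [List.range_eq_range', flatMap_expand (ccnt gym R) C 0, Nat.cast_zero]
  rw [hrows, hcols, hr1, hc1, hn1]
  set N := ((List.range R).map (rcnt gym C)).sum with hNdef
  have hswap : ((List.range C).map (ccnt gym R)).sum = N := (sum_swap gym R C).symm
  have hlen : (expandFrom 0 ((List.range R).map (rcnt gym C))).length = N :=
    length_expandFrom _ 0
  have hfd : PySem.Int.floordiv ((N : Nat) : Int) 2 = ((N / 2 : Nat) : Int) := by
    exact_mod_cast PySem.Int.floordiv_natCast N 2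
  by_cases hN : N = 0
  · -- no 'E' at all: both sides return [0, 0]
    have hz := List.sum_eq_zero_iff.mp (hNdef ▸ hN :
      ((List.range R).map (rcnt gym C)).sum = 0)
    have hz' := List.sum_eq_zero_iff.mp (hswap.trans hN)
    have hnil : expandFrom 0 ((List.range R).map (rcnt gym C)) = [] :=
      List.eq_nil_of_length_eq_zero (by rw [hlen, hN])
    rw [if_pos hnil, hN]
    have hfd0 : PySem.Int.floordiv (((0 : Nat) : Int)) 2 = ((0 / 2 : Nat) : Int) := by
      exact_mod_cast PySem.Int.floordiv_natCast 0 2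
    rw [hfd0]
    have e1 : scanBreak (((0 / 2 : Nat) : Int) + 1)
        ((List.range R).map (fun t => (rcnt gym C t : Int))) 0 0 = 0 := by
      apply scan_zero
      · intro x hx
        obtain ⟨t, ht, rfl⟩ := List.mem_map.mp hx
        have : rcnt gym C t = 0 := hz _ (List.mem_map_of_mem ht)
        rw [this]; rfl
      · norm_num
    have e2 : scanBreak (((0 / 2 : Nat) : Int) + 1)
        ((List.range C).map (fun t => (ccnt gym R t : Int))) 0 0 = 0 := by
      apply scan_zero
      · intro x hx
        obtain ⟨t, ht, rfl⟩ := List.mem_map.mp hx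
        have : ccnt gym R t = 0 := hz' _ (List.mem_map_of_mem ht)
        rw [this]; rfl
      · norm_num
    rw [e1, e2]
  · -- at least one 'E': A's prefix scans find exactly B's median coordinates
    have hNpos : 0 < N := Nat.pos_of_ne_zero hN
    have hk : N / 2 < N := Nat.div_lt_self hNpos (by norm_num)
    have hnotnil : ¬ expandFrom 0 ((List.range R).map (rcnt gym C)) = [] := by
      intro h
      rw [h] at hlen
      exact hN hlen.symm
    rw [if_neg hnotnil, hlen, hfd]
    have hm1 : (expandFrom 0 ((List.range R).map (rcnt gym C))).getD (N / 2) 0 =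
        0 + scanBreak (((N / 2 : Nat) : Int) + 1)
          (((List.range R).map (rcnt gym C)).map (fun x : Nat => (x : Int))) 0 0 :=
      median_getD _ 0 (N / 2) hk
    have hm2 : (expandFrom 0 ((List.range C).map (ccnt gym R))).getD (N / 2) 0 =
        0 + scanBreak (((N / 2 : Nat) : Int) + 1)
          (((List.range C).map (ccnt gym R)).map (fun x : Nat => (x : Int))) 0 0 :=
      median_getD _ 0 (N / 2) (by rw [hswap]; exact hk)
    rw [List.map_map] at hm1 hm2
    have hcomp1 : ((fun x : Nat => (x : Int)) ∘ rcnt gym C) =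
        (fun t => (rcnt gym C t : Int)) := rfl
    have hcomp2 : ((fun x : Nat => (x : Int)) ∘ ccnt gym R) =
        (fun t => (ccnt gym R t : Int)) := rfl
    rw [hcomp1] at hm1
    rw [hcomp2] at hm2
    rw [hm1, hm2]
    ring_nf
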